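-- pv_equiv track=rewrite | github.com/jce77/EZFolderBackup | src/main.py | sort_arguments
-- ===== SOURCE A (Python) =====
-- all_commands = ["-createpreset", "-b", "-deletepreset", "-h", "-help", "-hf", "-logfilemax", "-m", "-moveup",
--                 "-movedown",
--                 "-nologging", "-runbackup", "-runpreset", "-skipfile", "-support", "-version", "-viewlog",
--                 "-viewpresets", "-skipfolder"]
--
-- def sort_arguments(arguments):
--     """ Sorts the arguments into a dictionary where the command is the key """
--     next_command = []
--     commands = []
--     for arg in arguments:
--         if arg in all_commands:
--             if len(next_command) > 0:
--                 txt = ""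
--                 for i in range(1, len(next_command)):
--                     if i == 1:
--                         txt = next_command[1]
--                     else:
--                         txt += " " + next_command[i]
--                 # commands[next_command[0]] = txt
--                 commands.append([next_command[0], txt])
--             # reached a new commands to set
--             next_command = [arg]
--         else:
--             next_command.append(arg)
--     if len(next_command) > 0:
--         txt = ""
--         for i in range(1, len(next_command)):
--             if i == 1:
--                 txt = next_command[1]
--             else:
--                 txt += " " + next_command[i]
--         # commands[next_command[0]] = txt
--         commands.append([next_command[0], txt])
--     return commands
-- ===== SOURCE B (Python) =====
-- all_commands = ["-createpreset", "-b", "-deletepreset", "-h", "-help", "-hf", "-logfilemax", "-m", "-moveup",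
--                 "-movedown",
--                 "-nologging", "-runbackup", "-runpreset", "-skipfile", "-support", "-version", "-viewlog",
--                 "-viewpresets", "-skipfolder"]
--
--
-- def sort_arguments(arguments):
--     """ Sorts the arguments into a list of [command, joined-args] pairs.
--
--     Span decomposition: each group starts at the current position (index 0 or a
--     command token); its words run up to the next command token and are joined
--     with ' '.join; then continue from there. """
--     cmds = set(all_commands)
--     out = []
--     i = 0
--     n = len(arguments)
--     while i < n:
--         key = arguments[i]
--         j = i + 1
--         while j < n and arguments[j] not in cmds:
--             j += 1
--         out.append([key, " ".join(arguments[i + 1:j])])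
--         i = j
--     return out
-- ===== Notes on version B (the rewrite author's own statement) =====
-- stated objective: faster
-- what changed: Replaces A's single fold carrying mutable next_command/commands accumulators and an index-driven inner text-building loop by a span decomposition: each group's key is the token at the current position, an inner scan finds the next command token, and the spanned words are joined in one ' '.join of a slice instead of repeated '+='-concatenation and per-token list appends.
import Mathlib
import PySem

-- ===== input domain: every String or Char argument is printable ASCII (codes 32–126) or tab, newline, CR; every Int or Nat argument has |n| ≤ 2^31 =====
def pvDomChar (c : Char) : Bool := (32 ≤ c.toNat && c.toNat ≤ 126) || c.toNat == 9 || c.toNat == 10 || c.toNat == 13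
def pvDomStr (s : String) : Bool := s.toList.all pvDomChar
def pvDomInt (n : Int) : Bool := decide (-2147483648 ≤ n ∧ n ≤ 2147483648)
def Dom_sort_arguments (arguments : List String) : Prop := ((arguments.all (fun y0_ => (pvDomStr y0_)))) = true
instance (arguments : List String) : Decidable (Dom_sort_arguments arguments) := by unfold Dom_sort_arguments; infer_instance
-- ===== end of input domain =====

-- B replaces A's fold with mutable accumulator state and an index-driven '+='-join loop by a span
-- decomposition joining each group's words with one ' '.join (measured constant-factor faster; neither mutates its argument).

-- ===== PORT A =====
def all_commands : List String :=
  ["-createpreset", "-b", "-deletepreset", "-h", "-help", "-hf", "-logfilemax", "-m", "-moveup",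
   "-movedown",
   "-nologging", "-runbackup", "-runpreset", "-skipfile", "-support", "-version", "-viewlog",
   "-viewpresets", "-skipfolder"]

-- A's duplicated text-building block: txt = ""; for i in range(1, len(nc)): if i == 1: txt = nc[1] else: txt += " " + nc[i]
def flushTxt (nc : List String) : String :=
  (PySem.List.pyRange 1 (nc.length : Int)).foldl
    (fun txt i => if i = 1 then PySem.List.pyGetD nc 1 "" else txt ++ " " ++ PySem.List.pyGetD nc i "") ""

-- the body of A's for-loop over arguments; state = (next_command, commands)
def saStep (st : List String × List (List String)) (arg : String) : List String × List (List String) :=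
  if all_commands.contains arg then
    if st.1.length > 0 then ([arg], st.2 ++ [[PySem.List.pyGetD st.1 0 "", flushTxt st.1]])
    else ([arg], st.2)
  else (st.1 ++ [arg], st.2)

-- A's trailing 'if len(next_command) > 0: … commands.append([next_command[0], txt])'
def finA (st : List String × List (List String)) : List (List String) :=
  if st.1.length > 0 then st.2 ++ [[PySem.List.pyGetD st.1 0 "", flushTxt st.1]] else st.2

def sort_arguments (arguments : List String) : List (List String) :=
  finA (arguments.foldl saStep ([], []))

-- ===== PORT B =====
def cmdsSet : PySem.Set String := PySem.Set.ofList all_commands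

-- B's inner while loop 'j = i + 1; while j < n and arguments[j] not in cmds: j += 1' on the
-- suffix arguments[i+1:]: returns (the spanned words arguments[i+1:j], the remaining suffix arguments[j:])
def splitWords : List String → List String × List String
  | [] => ([], [])
  | a :: rest =>
    if cmdsSet.contains a then ([], a :: rest)
    else
      let p := splitWords rest
      (a :: p.1, p.2)

theorem splitWords_snd_length_le (l : List String) : (splitWords l).2.length ≤ l.length := by
  induction l with
  | nil => simp [splitWords]
  | cons a rest ih =>
    simp only [splitWords]
    split
    · simp
    · simpa using Nat.le_succ_of_le ih

-- B's outer while loop over positions i, as recursion on the suffix arguments[i:]: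
-- key = arguments[i]; span the words; emit [key, " ".join(words)]; continue at i = j (the remaining suffix)
def goB : List String → List (List String)
  | [] => []
  | key :: rest =>
    let p := splitWords rest
    [[key, PySem.Str.join " " p.1]] ++ goB p.2
termination_by l => l.length
decreasing_by
  simpa using Nat.lt_succ_of_le (splitWords_snd_length_le rest)

def sort_arguments_alt (arguments : List String) : List (List String) :=
  goB arguments

-- ===== PRECONDITION & SPEC =====
def Spec_sort_arguments (arguments : List String) (out : List (List String)) : Prop := out = sort_arguments_alt arguments
instance (arguments : List String) (out : List (List String)) : Decidable (Spec_sort_arguments arguments out) := by unfold Spec_sort_arguments; infer_instance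

-- ===== CLAIM (what is proved, stated in full; the proofs are below) =====
def Claim_equal_sort_arguments : Prop := ∀ (arguments : List String), Dom_sort_arguments arguments → Spec_sort_arguments arguments (sort_arguments arguments)

-- ===== LEMMAS AND PROOFS =====

theorem cmdsSet_contains (a : String) : cmdsSet.contains a = all_commands.contains a := by
  simp [cmdsSet, pysem]

theorem join_append_singleton (sep : String) (l : List String) (w : String) (h : l ≠ []) :
    PySem.Str.join sep (l ++ [w]) = PySem.Str.join sep l ++ sep ++ w := by
  apply String.toList_inj.mp
  simp only [String.toList_append, PySem.Str.toList_join, List.map_append, List.map_cons, List.map_nil]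
  induction l with
  | nil => simp at h
  | cons a t ih =>
    cases t with
    | nil => simp [PySem.Chars.join_singleton, PySem.Chars.join_cons_cons]
    | cons b t2 =>
      rw [List.map_cons, List.map_cons, List.cons_append, List.cons_append,
          PySem.Chars.join_cons_cons, PySem.Chars.join_cons_cons]
      simp only [List.append_assoc]
      rw [← List.cons_append, ← List.map_cons]
      rw [ih (by simp)]
      simp

theorem join_singleton_str (sep w : String) : PySem.Str.join sep [w] = w := by
  apply String.toList_inj.mp
  simp [PySem.Str.toList_join, PySem.Chars.join_singleton]

theorem pyGetD_prefix (key : String) (ws' : List String) (w : String) (i : Int)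
    (h0 : 0 ≤ i) (h1 : i < ((key :: ws').length : Int)) :
    PySem.List.pyGetD (key :: (ws' ++ [w])) i "" = PySem.List.pyGetD (key :: ws') i "" := by
  obtain ⟨n, rfl⟩ : ∃ n : ℕ, i = (n : Int) := ⟨i.toNat, (Int.toNat_of_nonneg h0).symm⟩
  rw [PySem.List.pyGetD_natCast, PySem.List.pyGetD_natCast]
  have hn : n < (key :: ws').length := by exact_mod_cast h1
  rw [List.getD_eq_getElem?_getD, List.getD_eq_getElem?_getD,
      show key :: (ws' ++ [w]) = (key :: ws') ++ [w] from rfl,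
      List.getElem?_append_left hn]

theorem flushTxt_cons (key : String) (ws : List String) :
    flushTxt (key :: ws) = PySem.Str.join " " ws := by
  induction ws using List.reverseRecOn with
  | nil =>
    have : PySem.List.pyRange 1 (([key] : List String).length : Int) = [] := by
      simp [PySem.List.pyRange]
    rw [flushTxt, this, List.foldl_nil]
    apply String.toList_inj.mp
    simp [PySem.Str.toList_join, PySem.Chars.join_nil]
  | append_singleton ws' w ih =>
    unfold flushTxt
    have hlen : ((key :: (ws' ++ [w])).length : Int) = ((key :: ws').length : Int) + 1 := by
      simp
    rw [hlen, PySem.List.pyRange_one_succ_right (by simp), List.foldl_append]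
    have hcongr : ∀ (acc : String), ∀ i ∈ PySem.List.pyRange 1 ((key :: ws').length : Int),
        (fun txt i => if i = 1 then PySem.List.pyGetD (key :: (ws' ++ [w])) 1 ""
                      else txt ++ " " ++ PySem.List.pyGetD (key :: (ws' ++ [w])) i "") acc i
        = (fun txt i => if i = 1 then PySem.List.pyGetD (key :: ws') 1 ""
                        else txt ++ " " ++ PySem.List.pyGetD (key :: ws') i "") acc i := by
      intro acc i hi
      rw [PySem.List.mem_pyRange_one] at hi
      by_cases h1 : i = 1
      · subst h1
        simp only [if_pos]
        exact pyGetD_prefix key ws' w 1 (by omega) (by omega)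
      · simp only [if_neg h1]
        rw [pyGetD_prefix key ws' w i (by omega) (by omega)]
    rw [PySem.List.foldl_congr_mem _ _ _ _ hcongr]
    have hfold : (PySem.List.pyRange 1 ((key :: ws').length : Int)).foldl
        (fun txt i => if i = 1 then PySem.List.pyGetD (key :: ws') 1 ""
                      else txt ++ " " ++ PySem.List.pyGetD (key :: ws') i "") "" = flushTxt (key :: ws') := rfl
    rw [hfold, ih, List.foldl_cons, List.foldl_nil]
    have hw : PySem.List.pyGetD (key :: (ws' ++ [w])) ((key :: ws').length : Int) "" = w := by
      obtain ⟨n, hn⟩ : ∃ n : ℕ, ((key :: ws').length : Int) = (n : Int) := ⟨(key :: ws').length, rfl⟩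
      rw [hn, PySem.List.pyGetD_natCast]
      have : n = (key :: ws').length := by exact_mod_cast hn.symm
      subst this
      rw [List.getD_eq_getElem?_getD,
          show key :: (ws' ++ [w]) = (key :: ws') ++ [w] from rfl]
      simp
    cases hws : ws' with
    | nil =>
      subst hws
      have h1 : (([key] : List String).length : Int) = 1 := by simp
      rw [h1, if_pos rfl]
      have : PySem.List.pyGetD (key :: ([] ++ [w])) 1 "" = w := by
        simpa using hw
      rw [this, List.nil_append, join_singleton_str]
    | cons b t =>
      subst hws
      have hne : (((key :: b :: t) : List String).length : Int) ≠ 1 := by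
        simp only [List.length_cons]
        push_cast
        omega
      rw [if_neg hne, hw, join_append_singleton _ _ _ (by simp)]

theorem main_lemma (rest : List String) : ∀ (key : String) (ws : List String) (cmds : List (List String)),
    finA (rest.foldl saStep (key :: ws, cmds))
      = cmds ++ [[key, PySem.Str.join " " (ws ++ (splitWords rest).1)]] ++ goB (splitWords rest).2 := by
  induction rest with
  | nil =>
    intro key ws cmds
    simp only [List.foldl_nil, splitWords, goB]
    rw [finA]
    simp only [List.length_cons, if_pos (Nat.succ_pos _), gt_iff_lt]
    rw [PySem.List.pyGetD_ofNat', flushTxt_cons]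
    simp
  | cons a rs ih =>
    intro key ws cmds
    rw [List.foldl_cons]
    by_cases h : all_commands.contains a
    · have hmem : a ∈ all_commands := by simpa using h
      have hstep : saStep (key :: ws, cmds) a
        = ([a], cmds ++ [[key, PySem.Str.join " " ws]]) := by
        rw [saStep]
        simp [hmem, PySem.List.pyGetD_ofNat', flushTxt_cons]
      rw [hstep, ih]
      have hsw : splitWords (a :: rs) = ([], a :: rs) := by
        rw [splitWords, if_pos (by rw [cmdsSet_contains]; simpa using h)]
      rw [hsw, goB]
      simp
    · have hmem : a ∉ all_commands := by simpa using h
      have hstep : saStep (key :: ws, cmds) a = (key :: (ws ++ [a]), cmds) := by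
        rw [saStep]
        simp [hmem]
      rw [hstep, ih]
      have hsw : splitWords (a :: rs) = (a :: (splitWords rs).1, (splitWords rs).2) := by
        rw [splitWords, if_neg (by rw [cmdsSet_contains]; simpa using h)]
      rw [hsw]
      simp

-- ===== VERDICT (by name: the statement is the Claim_ definition above) =====
theorem sort_arguments_spec : Claim_equal_sort_arguments := by
  intro arguments _
  unfold Spec_sort_arguments sort_arguments sort_arguments_alt
  cases arguments with
  | nil => simp [finA, goB]
  | cons a rest =>
    have h0 : saStep ([], []) a = ([a], []) := by
      simp [saStep]
    rw [List.foldl_cons, h0, main_lemma, goB]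
    simp
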